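-- pv_equiv track=rewrite | github.com/viktoriaDEVV/AOIS | lab1/run.py | decimal_integer_to_direct
-- ===== SOURCE A (Python) =====
-- def decimal_integer_to_direct(decimal_number):
--     binary_number = ['0'] * 8
--     index = len(binary_number) - 1
--     if decimal_number < 0:
--         decimal_number = -decimal_number
--         binary_number[0] = '1'
--     while decimal_number > 0 and index >= (1 if binary_number[0] == '1' else 0):
--         binary_number[index] = str(decimal_number % 2)
--         decimal_number //= 2
--         index -= 1
--     return ''.join(binary_number)
-- ===== SOURCE B (Python) =====
-- def decimal_integer_to_direct(decimal_number):
--     if decimal_number < 0: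
--         return '1' + format((-decimal_number) % 128, '07b')
--     return format(decimal_number % 256, '08b')
-- ===== Notes on version B (the rewrite author's own statement) =====
-- stated objective: idiomatic
-- what changed: Replaces the mutable bit list, per-bit indexing and while loop with a closed-form: fixed-width truncation by % (256 for non-negative, 128 for the magnitude of negatives) and Python's built-in zero-padded binary formatting.
import Mathlib
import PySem

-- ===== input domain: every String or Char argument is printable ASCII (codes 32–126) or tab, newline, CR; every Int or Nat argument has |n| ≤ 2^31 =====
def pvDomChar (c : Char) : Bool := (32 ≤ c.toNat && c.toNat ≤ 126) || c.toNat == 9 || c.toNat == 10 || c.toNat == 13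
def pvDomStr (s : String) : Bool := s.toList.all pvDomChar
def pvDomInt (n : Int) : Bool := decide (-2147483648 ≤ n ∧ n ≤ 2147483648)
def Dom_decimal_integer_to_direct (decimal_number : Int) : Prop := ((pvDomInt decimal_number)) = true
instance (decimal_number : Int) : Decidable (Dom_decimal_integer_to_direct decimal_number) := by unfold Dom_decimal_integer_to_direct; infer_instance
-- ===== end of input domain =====

-- B replaces A's mutable bit list and while loop with a closed form: fixed-width
-- truncation by Python % and built-in zero-padded binary formatting (objective: idiomatic).

-- ===== PORT A =====
-- the while loop: state (decimal_number, index, binary_number); at most 8 iterations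
-- (index drops by 1 each pass from 7), so fuel 9 is never exhausted.
def pvALoop : Nat → Int → Int → List String → List String
  | 0, _, _, bits => bits
  | f + 1, d, idx, bits =>
    if d > 0 ∧ idx ≥ (if bits.head? = some "1" then 1 else 0) then
      -- binary_number[index] = str(decimal_number % 2): index is 0‥7 here (idx ≥ lim ≥ 0),
      -- so List.set at idx.toNat is exact for this in-range Python list assignment
      pvALoop f (PySem.Int.floordiv d 2) (idx - 1)
        (bits.set idx.toNat (PySem.Int.toStr (PySem.Int.mod d 2)))
    else bits

def decimal_integer_to_direct (decimal_number : Int) : String :=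
  let binary_number := List.replicate 8 "0"
  let index : Int := (binary_number.length : Int) - 1
  if decimal_number < 0 then
    PySem.Str.join "" (pvALoop 9 (-decimal_number) index (binary_number.set 0 "1"))
  else
    PySem.Str.join "" (pvALoop 9 decimal_number index binary_number)

-- ===== PORT B =====
-- format(m, '0<w>b') : the zero-padded width-w binary digits of m, LSB last;
-- exact for 0 ≤ m < 2^w, which holds at both call sites (m is a % 128 / % 256 result)
def pvFormatBin : Nat → Int → List String
  | 0, _ => []
  | w + 1, m => pvFormatBin w (PySem.Int.floordiv m 2) ++ [PySem.Int.toStr (PySem.Int.mod m 2)]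

def decimal_integer_to_direct_alt (decimal_number : Int) : String :=
  if decimal_number < 0 then
    PySem.Str.join "" ("1" :: pvFormatBin 7 (PySem.Int.mod (-decimal_number) 128))
  else
    PySem.Str.join "" (pvFormatBin 8 (PySem.Int.mod decimal_number 256))

-- ===== PRECONDITION & SPEC =====
def Spec_decimal_integer_to_direct (decimal_number : Int) (out : String) : Prop := out = decimal_integer_to_direct_alt decimal_number
instance (decimal_number : Int) (out : String) : Decidable (Spec_decimal_integer_to_direct decimal_number out) := by unfold Spec_decimal_integer_to_direct; infer_instance

-- ===== CLAIM (what is proved, stated in full; the proofs are below) =====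
def Claim_equal_decimal_integer_to_direct : Prop := ∀ (decimal_number : Int), Dom_decimal_integer_to_direct decimal_number → Spec_decimal_integer_to_direct decimal_number (decimal_integer_to_direct decimal_number)

-- ===== LEMMAS AND PROOFS =====

theorem emod_unique (a b q r : Int) (h0 : 0 ≤ r) (h1 : r < b) (h2 : a = b * q + r) :
    a % b = r := by
  have h3 : a = r + b * q := by omega
  subst h3; rw [Int.add_mul_emod_self_left, Int.emod_eq_of_lt h0 h1]

-- d % 2^(w+1) decomposed into its low bit and the rest
theorem emod_pow_succ (d : Int) (w : Nat) :
    d % 2 ^ (w + 1) = 2 * (d / 2 % 2 ^ w) + d % 2 := by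
  have hp : (0:Int) < 2 ^ w := by positivity
  have h1 : 2 * (d / 2) + d % 2 = d := by omega
  have h2 : (2:Int) ^ w * (d / 2 / 2 ^ w) + d / 2 % 2 ^ w = d / 2 :=
    by have := Int.ediv_mul_add_emod (d / 2) (2 ^ w); linarith
  have hb0 : 0 ≤ d / 2 % 2 ^ w := Int.emod_nonneg _ (by positivity)
  have hb1 : d / 2 % 2 ^ w < 2 ^ w := Int.emod_lt_of_pos _ hp
  have hm : d % 2 = 0 ∨ d % 2 = 1 := Int.emod_two_eq_zero_or_one d
  refine emod_unique _ _ (d / 2 / 2 ^ w) _ (by omega) (by rw [pow_succ]; omega) ?_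
  rw [pow_succ]
  nlinarith [h1, h2]

-- pvFormatBin only reads the low w bits
theorem pvFormatBin_congr (w : Nat) : ∀ d e : Int, d % 2 ^ w = e % 2 ^ w →
    pvFormatBin w d = pvFormatBin w e := by
  induction w with
  | zero => intro d e _; rfl
  | succ w ih =>
    intro d e h
    have hd := emod_pow_succ d w
    have he := emod_pow_succ e w
    have hdm : d % 2 = 0 ∨ d % 2 = 1 := Int.emod_two_eq_zero_or_one d
    have hem : e % 2 = 0 ∨ e % 2 = 1 := Int.emod_two_eq_zero_or_one e
    have hlow : d % 2 = e % 2 := by omega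
    have hhigh : d / 2 % 2 ^ w = e / 2 % 2 ^ w := by omega
    simp only [pvFormatBin, PySem.Int.floordiv_eq_ediv_of_pos (by norm_num : (0:Int) < 2),
      PySem.Int.mod_eq_emod_of_pos (by norm_num : (0:Int) < 2)]
    rw [ih _ _ hhigh, hlow]

theorem pvFormatBin_mod (w : Nat) (d : Int) :
    pvFormatBin w (d % 2 ^ w) = pvFormatBin w d := by
  apply pvFormatBin_congr
  exact Int.emod_emod_of_dvd d dvd_rfl

theorem pvFormatBin_zero (w : Nat) : pvFormatBin w 0 = List.replicate w "0" := by
  induction w with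
  | zero => rfl
  | succ w ih =>
    have h0 : PySem.Int.floordiv 0 2 = 0 := by
      rw [PySem.Int.floordiv_eq_ediv_of_pos (by norm_num)]; rfl
    have h1 : PySem.Int.mod 0 2 = 0 := by
      rw [PySem.Int.mod_eq_emod_of_pos (by norm_num)]; rfl
    simp only [pvFormatBin, h0, h1, ih]
    rw [List.replicate_succ' ]
    rfl

-- the loop writes exactly the zero-padded binary digits of d into the zero block
theorem pvALoop_spec (head : List String) (hhead : head = [] ∨ head = ["1"]) :
    ∀ (w f : Nat) (d : Int) (tail : List String), 0 ≤ d → w ≤ f →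
    pvALoop f d ((head.length : Int) + w - 1) (head ++ List.replicate w "0" ++ tail)
      = head ++ pvFormatBin w d ++ tail := by
  intro w
  induction w with
  | zero =>
    intro f d tail hd _
    cases f with
    | zero => simp [pvALoop, pvFormatBin]
    | succ f =>
      simp only [pvALoop, pvFormatBin]
      rw [if_neg]
      · simp
      · rintro ⟨-, h2⟩
        rcases hhead with h | h <;> subst h <;> simp at h2 <;>
          first
          | (split at h2 <;> omega)
          | omega
  | succ w ih =>
    intro f d tail hd hf
    cases f with
    | zero => omega
    | succ f =>
      have hidx : ((head.length : Int) + ((w + 1 : Nat) : Int) - 1) = (head.length : Int) + w := by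
        push_cast; ring
      rw [hidx]
      by_cases hd0 : d > 0
      · have hcond : ((head.length : Int) + w) ≥ (if (head ++ List.replicate (w+1) "0" ++ tail).head? = some "1" then (1:Int) else 0) := by
          rcases hhead with h | h <;> subst h <;> simp [List.replicate_succ]
        have hset : (head ++ List.replicate (w+1) "0" ++ tail).set ((head.length : Int) + w).toNat
              (PySem.Int.toStr (PySem.Int.mod d 2))
            = head ++ List.replicate w "0" ++ (PySem.Int.toStr (PySem.Int.mod d 2) :: tail) := by
          have ht : ((head.length : Int) + w).toNat = head.length + w := by omega
          rw [ht, List.replicate_succ']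
          rw [List.append_assoc head, List.set_append, if_neg (by simp)]
          simp [List.append_assoc]
        simp only [pvALoop]
        rw [if_pos ⟨hd0, hcond⟩, hset]
        have hrec := ih f (PySem.Int.floordiv d 2) (PySem.Int.toStr (PySem.Int.mod d 2) :: tail)
          (by rw [PySem.Int.floordiv_eq_ediv_of_pos (by norm_num)]; omega) (by omega)
        rw [hrec]
        simp [pvFormatBin, List.append_assoc]
      · have hd0' : d = 0 := by omega
        subst hd0'
        simp only [pvALoop]
        rw [if_neg (by simp), pvFormatBin_zero]

theorem set_replicate_head : (List.replicate 8 "0").set 0 "1" = ["1"] ++ List.replicate 7 "0" ++ [] := by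
  decide

-- ===== VERDICT (by name: the statement is the Claim_ definition above) =====
theorem decimal_integer_to_direct_spec : Claim_equal_decimal_integer_to_direct := by
  intro n _
  unfold Spec_decimal_integer_to_direct decimal_integer_to_direct decimal_integer_to_direct_alt
  by_cases hn : n < 0
  · simp only [if_pos hn, set_replicate_head]
    have h := pvALoop_spec ["1"] (Or.inr rfl) 7 9 (-n) [] (by omega) (by omega)
    simp only [List.length_cons, List.length_nil, List.length_replicate, List.append_nil,
      List.nil_append, List.cons_append, Nat.cast_ofNat] at h ⊢
    norm_num at h ⊢
    rw [h]
    rw [show ((-n) % (128:Int)) = (-n) % 2 ^ 7 from by norm_num, pvFormatBin_mod]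
  · simp only [if_neg hn]
    have h := pvALoop_spec [] (Or.inl rfl) 8 9 n [] (by omega) (by omega)
    simp only [List.length_nil, List.length_replicate, List.append_nil, List.nil_append,
      Nat.cast_ofNat, Nat.cast_zero] at h ⊢
    norm_num at h ⊢
    rw [h]
    rw [show (n % (256:Int)) = n % 2 ^ 8 from by norm_num, pvFormatBin_mod]
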